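-- pv_equiv track=rewrite | github.com/afzalsiddique/problem-solving | Problem_Solving_Python/IntelligentMachine/SolarPanel.py | takeOnlyY
-- ===== SOURCE A (Python) =====
-- def takeOnlyY(A, x, y):
--     A.sort()
--     n=len(A)
--     cost=n*y
--     surplus=sum(A)
--     left=0
--     while left<n and surplus>=2*A[left]:
--         surplus-=2*A[left]
--         left+=1
--         cost-=y
--     return cost
-- ===== SOURCE B (Python) =====
-- from itertools import accumulate
--
--
-- def takeOnlyY(A, x, y):
--     # Sort in place (same observable mutation as the original) and take prefix sums.
--     A.sort()
--     total = sum(A)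
--     n = len(A)
--     pfx = list(accumulate(A))
--     # 'removed' = length of the longest prefix with 2*pfx[i] <= total.
--     # Because A is sorted, i -> 2*pfx[i] - total is convex (its increments
--     # 2*A[i+1] are nondecreasing), so once it turns positive after starting
--     # nonpositive it stays positive: the boundary can be found by BINARY SEARCH
--     # instead of a linear scan.
--     if n == 0 or 2 * pfx[0] > total:
--         removed = 0
--     else:
--         lo, hi = 0, n - 1          # invariant: 2*pfx[lo] <= total, all k > hi fail
--         while lo < hi:
--             mid = (lo + hi + 1) // 2
--             if 2 * pfx[mid] <= total:
--                 lo = mid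
--             else:
--                 hi = mid - 1
--         removed = lo + 1
--     return (n - removed) * y
-- ===== Notes on version B (the rewrite author's own statement) =====
-- stated objective: alternative
-- what changed: Replaces A's linear surplus-consuming while-loop with prefix sums plus a convexity-justified binary search for the boundary index (sortedness makes 2*prefix-total convex, so the takewhile boundary is binary-searchable); removed = boundary+1, result (n-removed)*y.
import Mathlib
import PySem

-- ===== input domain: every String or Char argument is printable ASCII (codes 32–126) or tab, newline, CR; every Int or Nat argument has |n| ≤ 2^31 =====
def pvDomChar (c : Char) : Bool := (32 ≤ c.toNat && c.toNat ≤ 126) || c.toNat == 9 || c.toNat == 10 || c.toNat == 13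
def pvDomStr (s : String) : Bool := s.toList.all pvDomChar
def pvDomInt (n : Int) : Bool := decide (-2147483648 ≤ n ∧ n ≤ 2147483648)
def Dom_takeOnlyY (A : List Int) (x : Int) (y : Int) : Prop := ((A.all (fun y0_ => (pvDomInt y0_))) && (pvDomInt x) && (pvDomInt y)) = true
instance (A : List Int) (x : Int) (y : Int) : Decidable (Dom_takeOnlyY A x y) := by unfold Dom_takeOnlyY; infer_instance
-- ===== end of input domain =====

-- B replaces A's linear surplus-consuming while-loop by a binary search over prefix
-- sums (valid because sortedness makes the compared sequence convex); alternative
-- algorithm, same overall cost. A sorts its argument in place; the equivalence proved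
-- here is about the RETURN value only (B performs the same in-place sort).

-- ===== PORT A =====
-- the while loop: left indexes the sorted list, so recurse on its tail
def pvLoopA (y : Int) : List Int → Int → Int → Int
  | [], _, cost => cost
  | a :: rest, surplus, cost =>
    if surplus ≥ 2 * a then pvLoopA y rest (surplus - 2 * a) (cost - y) else cost

def takeOnlyY (A : List Int) (x : Int) (y : Int) : Int :=
  let As := PySem.List.sorted A (fun v => v) false
  let n : Int := As.length
  let cost := n * y
  let surplus := As.foldl (· + ·) 0
  pvLoopA y As surplus cost

-- ===== PORT B =====
-- itertools.accumulate(A): the running prefix sums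
def pvAccum (s : Int) : List Int → List Int
  | [] => []
  | v :: rest => (s + v) :: pvAccum (s + v) rest

-- the while-loop binary search; pfx[mid] is always in range here, so getD is exact
def pvBS (pfx : List Int) (total : Int) (lo hi : Nat) : Nat :=
  if h : lo < hi then
    let mid := (lo + hi + 1) / 2
    if 2 * pfx.getD mid 0 ≤ total then pvBS pfx total mid hi
    else pvBS pfx total lo (mid - 1)
  else lo
termination_by hi - lo
decreasing_by all_goals omega

def takeOnlyY_alt (A : List Int) (x : Int) (y : Int) : Int :=
  let As := PySem.List.sorted A (fun v => v) false
  let total := As.foldl (· + ·) 0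
  let n := As.length
  let pfx := pvAccum 0 As
  let removed : Nat :=
    if n = 0 ∨ 2 * pfx.getD 0 0 > total then 0
    else pvBS pfx total 0 (n - 1) + 1
  (Int.ofNat n - Int.ofNat removed) * y

-- ===== PRECONDITION & SPEC =====
def Spec_takeOnlyY (A : List Int) (x : Int) (y : Int) (out : Int) : Prop := out = takeOnlyY_alt A x y
instance (A : List Int) (x : Int) (y : Int) (out : Int) : Decidable (Spec_takeOnlyY A x y out) := by unfold Spec_takeOnlyY; infer_instance

-- ===== CLAIM (what is proved, stated in full; the proofs are below) =====
def Claim_equal_takeOnlyY : Prop := ∀ (A : List Int) (x : Int) (y : Int), Dom_takeOnlyY A x y → Spec_takeOnlyY A x y (takeOnlyY A x y)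

-- ===== LEMMAS AND PROOFS =====

-- how many leading elements A's while loop consumes, as a function of the surplus
def pvCnt : Int → List Int → Nat
  | _, [] => 0
  | surplus, a :: rest => if surplus ≥ 2 * a then pvCnt (surplus - 2 * a) rest + 1 else 0

theorem pvLoopA_eq (y : Int) : ∀ (l : List Int) (surplus cost : Int),
    pvLoopA y l surplus cost = cost - (pvCnt surplus l : Int) * y := by
  intro l
  induction l with
  | nil => intro surplus cost; simp [pvLoopA, pvCnt]
  | cons a rest ih =>
    intro surplus cost
    simp only [pvLoopA, pvCnt]
    split
    · rw [ih]; push_cast; ring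
    · simp

-- A's consumed count = first index of the prefix-sum list whose doubled value exceeds total
theorem pvCnt_eq_findIdx (total : Int) : ∀ (l : List Int) (s : Int),
    pvCnt (total - 2 * s) l = (pvAccum s l).findIdx (fun p => decide (2 * p > total)) := by
  intro l
  induction l with
  | nil => intro s; rfl
  | cons v rest ih =>
    intro s
    simp only [pvAccum, pvCnt, List.findIdx_cons]
    by_cases h' : total - 2 * s ≥ 2 * v
    · rw [if_pos h']
      have : (decide (2 * (s + v) > total)) = false := by simp; omega
      rw [this]
      simp only [cond_false]
      have key : total - 2 * s - 2 * v = total - 2 * (s + v) := by ring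
      rw [key, ih (s + v)]
    · rw [if_neg h']
      have : (decide (2 * (s + v) > total)) = true := by simp; omega
      rw [this]
      simp

theorem pvAccum_length (s : Int) (l : List Int) : (pvAccum s l).length = l.length := by
  induction l generalizing s with
  | nil => simp [pvAccum]
  | cons v rest ih => simp [pvAccum, ih]

theorem pvAccum_head (s : Int) (l : List Int) (h : l ≠ []) :
    (pvAccum s l).getD 0 0 = s + l.getD 0 0 := by
  cases l with
  | nil => exact absurd rfl h
  | cons v rest => simp [pvAccum]

theorem pvAccum_step (l : List Int) : ∀ (s : Int) (i : Nat), i + 1 < l.length →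
    (pvAccum s l).getD (i + 1) 0 = (pvAccum s l).getD i 0 + l.getD (i + 1) 0 := by
  induction l with
  | nil => intro s i h; simp at h
  | cons v rest ih =>
    intro s i h
    cases i with
    | zero =>
      simp only [pvAccum, List.getD_cons_succ, List.getD_cons_zero]
      have hne : rest ≠ [] := by
        intro hc; rw [hc] at h; simp at h
      rw [pvAccum_head (s + v) rest hne]
    | succ j =>
      simp only [pvAccum, List.getD_cons_succ]
      exact ih (s + v) j (by simpa using h)

-- convexity: once the doubled prefix sum exceeds total (having started below), it stays above
theorem pvUpStep (pfx As : List Int) (total : Int)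
    (hlen : pfx.length = As.length)
    (hstep : ∀ i, i + 1 < As.length → pfx.getD (i + 1) 0 = pfx.getD i 0 + As.getD (i + 1) 0)
    (hmono : ∀ p q, p ≤ q → q < As.length → As.getD p 0 ≤ As.getD q 0)
    (h0 : ¬ 2 * pfx.getD 0 0 > total) :
    ∀ i, i + 1 < As.length → 2 * pfx.getD i 0 > total →
      pfx.getD i 0 ≤ pfx.getD (i + 1) 0 := by
  intro i
  induction i with
  | zero => intro _ hP; exact absurd hP h0
  | succ j ih =>
    intro hlt hP
    have hstep1 := hstep (j + 1) hlt
    have hstepj := hstep j (by omega)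
    have hm := hmono (j + 1) (j + 1 + 1) (by omega) hlt
    by_cases hPj : 2 * pfx.getD j 0 > total
    · have := ih (by omega) hPj
      omega
    · -- 2*pfx[j] ≤ total < 2*pfx[j+1], so As[j+1] > 0, hence As[j+2] > 0
      omega

theorem pvUp (pfx As : List Int) (total : Int)
    (hlen : pfx.length = As.length)
    (hstep : ∀ i, i + 1 < As.length → pfx.getD (i + 1) 0 = pfx.getD i 0 + As.getD (i + 1) 0)
    (hmono : ∀ p q, p ≤ q → q < As.length → As.getD p 0 ≤ As.getD q 0)
    (h0 : ¬ 2 * pfx.getD 0 0 > total) :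
    ∀ i j, i ≤ j → j < As.length → 2 * pfx.getD i 0 > total → 2 * pfx.getD j 0 > total := by
  intro i j
  induction j with
  | zero =>
    intro hij _ hP
    have h00 : i = 0 := by omega
    rw [h00] at hP
    exact hP
  | succ k ih =>
    intro hij hlt hP
    by_cases hik : i = k + 1
    · subst hik; exact hP
    · have hPk : 2 * pfx.getD k 0 > total := ih (by omega) (by omega) hP
      have := pvUpStep pfx As total hlen hstep hmono h0 k hlt hPk
      omega

-- binary search correctness under the upward-closed predicate
theorem pvBS_spec (pfx : List Int) (total : Int) (n : Nat) (hn : n = pfx.length)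
    (up : ∀ i j, i ≤ j → j < n → 2 * pfx.getD i 0 > total → 2 * pfx.getD j 0 > total) :
    ∀ d lo hi, hi - lo ≤ d → lo ≤ hi → hi < n →
      ¬ 2 * pfx.getD lo 0 > total →
      (∀ k, hi < k → k < n → 2 * pfx.getD k 0 > total) →
      let r := pvBS pfx total lo hi
      lo ≤ r ∧ r ≤ hi ∧ ¬ 2 * pfx.getD r 0 > total ∧
        (∀ k, r < k → k < n → 2 * pfx.getD k 0 > total) := by
  intro d
  induction d with
  | zero =>
    intro lo hi hd hle hlt hPlo htail
    have : lo = hi := by omega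
    subst this
    rw [pvBS]
    simp only [lt_irrefl, dite_false]
    exact ⟨le_refl _, le_refl _, hPlo, htail⟩
  | succ d ih =>
    intro lo hi hd hle hlt hPlo htail
    rw [pvBS]
    by_cases h : lo < hi
    · rw [dif_pos h]
      simp only []
      by_cases hmid : 2 * pfx.getD ((lo + hi + 1) / 2) 0 ≤ total
      · rw [if_pos hmid]
        have := ih ((lo + hi + 1) / 2) hi (by omega) (by omega) hlt (by omega)
          htail
        exact ⟨by omega, this.2.1, this.2.2.1, this.2.2.2⟩
      · rw [if_neg hmid]
        have htail' : ∀ k, (lo + hi + 1) / 2 - 1 < k → k < n → 2 * pfx.getD k 0 > total := by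
          intro k hk hkn
          by_cases hk2 : hi < k
          · exact htail k hk2 hkn
          · exact up ((lo + hi + 1) / 2) k (by omega) hkn (by omega)
        have := ih lo ((lo + hi + 1) / 2 - 1) (by omega) (by omega) (by omega) hPlo htail'
        exact ⟨this.1, by omega, this.2.2.1, this.2.2.2⟩
    · rw [dif_neg h]
      have : lo = hi := by omega
      subst this
      exact ⟨le_refl _, le_refl _, hPlo, htail⟩

-- findIdx of a "false up to m, true at m (or m = length)" predicate is m
theorem pvFindIdx_eq (p : Int → Bool) : ∀ (l : List Int) (m : Nat), m ≤ l.length →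
    (∀ k, k < m → p (l.getD k 0) = false) →
    (m < l.length → p (l.getD m 0) = true) →
    l.findIdx p = m := by
  intro l
  induction l with
  | nil => intro m hm _ _; simp at hm ⊢; omega
  | cons v rest ih =>
    intro m hm hfalse htrue
    cases m with
    | zero =>
      have := htrue (by simp)
      simp only [List.getD_cons_zero] at this
      simp [List.findIdx_cons, this]
    | succ m' =>
      have hv : p v = false := by
        have := hfalse 0 (by omega)
        simpa using this
      simp only [List.findIdx_cons, hv, cond_false]
      have : rest.findIdx p = m' := by
        apply ih m' (by simpa using hm)
        · intro k hk; exact hfalse (k + 1) (by omega)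
        · intro hlt; exact htrue (by simpa using hlt)
      omega

theorem pvSorted_mono (A : List Int) :
    ∀ p q, p ≤ q → q < (PySem.List.sorted A (fun v => v) false).length →
      (PySem.List.sorted A (fun v => v) false).getD p 0 ≤
      (PySem.List.sorted A (fun v => v) false).getD q 0 := by
  intro p q hpq hq
  have hp : p < (PySem.List.sorted A (fun v => v) false).length := by omega
  rw [List.getD_eq_getElem _ _ hp, List.getD_eq_getElem _ _ hq]
  exact PySem.List.sorted_id_getElem_mono A hpq hq

theorem takeOnlyY_spec : Claim_equal_takeOnlyY := by
  intro A x y _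
  unfold Spec_takeOnlyY takeOnlyY takeOnlyY_alt
  simp only []
  set As := PySem.List.sorted A (fun v => v) false with hAs
  set total := As.foldl (· + ·) 0 with htot
  set pfx := pvAccum 0 As with hpfx
  rw [pvLoopA_eq]
  have hcnt : pvCnt total As = pfx.findIdx (fun p => decide (2 * p > total)) := by
    have := pvCnt_eq_findIdx total As 0
    rw [show total - 2 * 0 = total by ring] at this
    exact this
  rw [hcnt]
  have hlen : pfx.length = As.length := pvAccum_length 0 As
  have hstep : ∀ i, i + 1 < As.length → pfx.getD (i + 1) 0 = pfx.getD i 0 + As.getD (i + 1) 0 :=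
    fun i h => pvAccum_step As 0 i h
  have hmono := pvSorted_mono A
  rw [← hAs] at hmono
  by_cases hdeg : As.length = 0 ∨ 2 * pfx.getD 0 0 > total
  · rw [if_pos hdeg]
    have hfi : pfx.findIdx (fun p => decide (2 * p > total)) = 0 := by
      rcases hdeg with h0 | h0
      · have : pfx = [] := List.eq_nil_of_length_eq_zero (by omega)
        simp [this]
      · apply pvFindIdx_eq _ pfx 0 (by omega) (by intro k hk; omega)
        intro _; simpa using h0
    rw [hfi]
    simp only [Int.ofNat_eq_natCast]
    push_cast
    ring
  · rw [if_neg hdeg]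
    have hne : As.length ≠ 0 := fun h => hdeg (Or.inl h)
    have h0' : ¬ 2 * pfx.getD 0 0 > total := fun h => hdeg (Or.inr h)
    have up := pvUp pfx As total hlen hstep hmono h0'
    have hbs := pvBS_spec pfx total As.length (by omega) up (As.length - 1) 0 (As.length - 1)
      (le_refl _) (by omega) (by omega) h0' (by intro k hk hkn; omega)
    set r := pvBS pfx total 0 (As.length - 1) with hr
    obtain ⟨_, hrhi, hPr, hPtail⟩ := hbs
    have hfi : pfx.findIdx (fun p => decide (2 * p > total)) = r + 1 := by
      apply pvFindIdx_eq _ pfx (r + 1) (by omega)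
      · intro k hk
        simp only [decide_eq_false_iff_not]
        intro hPk
        exact hPr (up k r (by omega) (by omega) hPk)
      · intro hlt
        simp only [decide_eq_true_eq]
        exact hPtail (r + 1) (by omega) (by omega)
    rw [hfi]
    simp only [Int.ofNat_eq_natCast]
    push_cast
    ring
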